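-- pv_equiv track=rewrite | github.com/aleksandarbisenic/Bisenic_et_al_2026 | KEGG_module_completeness/module_completeness.py | balance_parentheses
-- ===== SOURCE A (Python) =====
-- def validate_and_fix_parentheses(step):
--     """Validates and ensures parentheses in the step are balanced."""
--     stack = []
--     for char in step:
--         if char == '(':
--             stack.append('(')
--         elif char == ')':
--             if not stack:
--                 return False
--             stack.pop()
--     return not stack
--
-- def balance_parentheses(steps):
--     """Balances parentheses for module steps, ensuring that steps are not split across multiple lines."""
--     balanced_steps = []
--     temp_step = ""
--
--     for step in steps:
--         temp_step += step.strip()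
--         if validate_and_fix_parentheses(temp_step):
--             balanced_steps.append(temp_step)
--             temp_step = ""
--         else:
--             temp_step += " "
--
--     return balanced_steps
-- ===== SOURCE B (Python) =====
-- def balance_parentheses(steps):
--     """Incremental rewrite: running paren depth + underflow flag instead of rescanning the accumulated string."""
--     balanced_steps = []
--     parts = []
--     depth = 0
--     bad = False
--     for step in steps:
--         s = step.strip()
--         parts.append(s)
--         for ch in s:
--             if ch == '(':
--                 depth += 1
--             elif ch == ')':
--                 if depth == 0:
--                     bad = True
--                 else:
--                     depth -= 1
--         if depth == 0 and not bad:
--             balanced_steps.append(" ".join(parts))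
--             parts = []
--     return balanced_steps
-- ===== Notes on version B (the rewrite author's own statement) =====
-- stated objective: alternative
-- what changed: B replaces A's re-validation of the whole accumulated string on every step with an incremental running paren-depth counter plus a sticky underflow flag, collecting stripped pieces in a list joined once per emitted chunk.
import Mathlib
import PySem

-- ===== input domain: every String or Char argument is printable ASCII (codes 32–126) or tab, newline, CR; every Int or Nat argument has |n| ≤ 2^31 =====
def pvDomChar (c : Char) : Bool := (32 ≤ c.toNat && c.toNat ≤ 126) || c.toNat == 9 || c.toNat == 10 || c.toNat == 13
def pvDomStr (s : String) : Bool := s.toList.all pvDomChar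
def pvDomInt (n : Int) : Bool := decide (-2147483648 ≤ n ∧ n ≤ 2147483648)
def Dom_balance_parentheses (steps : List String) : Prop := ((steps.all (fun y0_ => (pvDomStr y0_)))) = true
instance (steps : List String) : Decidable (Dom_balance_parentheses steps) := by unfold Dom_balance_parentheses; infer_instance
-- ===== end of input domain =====

-- B replaces A's full rescan of the accumulated string per step by an incremental
-- running paren-depth counter with a sticky underflow flag (objective: alternative).

-- ===== PORT A =====
-- validate_and_fix_parentheses: stack of '(' chars, early-return False on underflow
def pvValidate (stack : List Char) : List Char → Bool
  | [] => stack.isEmpty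
  | c :: rest =>
    if c = '(' then pvValidate ('(' :: stack) rest
    else if c = ')' then
      match stack with
      | [] => false
      | _ :: t => pvValidate t rest
    else pvValidate stack rest

-- temp_step carried as its character list; strings rebuilt with String.ofList on append
def balance_parentheses (steps : List String) : List String :=
  (steps.foldl (fun (st : List String × List Char) step =>
      let temp := st.2 ++ (PySem.Str.strip step).toList
      if pvValidate [] temp then (st.1 ++ [String.ofList temp], [])
      else (st.1, temp ++ [' '])) ([], [])).1

-- ===== PORT B =====
-- one character of Source B's inner scan: running depth + sticky underflow flag
def pvScanStep (st : Int × Bool) (c : Char) : Int × Bool :=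
  if c = '(' then (st.1 + 1, st.2)
  else if c = ')' then (if st.1 = 0 then (st.1, true) else (st.1 - 1, st.2))
  else st

def balance_parentheses_alt (steps : List String) : List String :=
  (steps.foldl (fun (st : List String × List (List Char) × Int × Bool) step =>
      let s := (PySem.Str.strip step).toList
      let parts := st.2.1 ++ [s]
      let db := s.foldl pvScanStep (st.2.2.1, st.2.2.2)
      if db.1 = 0 ∧ db.2 = false then
        (st.1 ++ [String.ofList (PySem.Chars.join [' '] parts)], [], 0, false)
      else (st.1, parts, db.1, db.2)) ([], [], 0, false)).1

-- ===== PRECONDITION & SPEC =====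
def Spec_balance_parentheses (steps : List String) (out : List String) : Prop := out = balance_parentheses_alt steps
instance (steps : List String) (out : List String) : Decidable (Spec_balance_parentheses steps out) := by unfold Spec_balance_parentheses; infer_instance

-- ===== CLAIM (what is proved, stated in full; the proofs are below) =====
def Claim_equal_balance_parentheses : Prop := ∀ (steps : List String), Dom_balance_parentheses steps → Spec_balance_parentheses steps (balance_parentheses steps)

-- ===== LEMMAS AND PROOFS =====

-- A's temp_step as a function of B's pending parts: joined with " " plus the trailing
-- space A appends after each unbalanced step (empty when no parts are pending).
def pvRep : List (List Char) → List Char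
  | [] => []
  | p :: rest => PySem.Chars.join [' '] (p :: rest) ++ [' ']

theorem pvRep_snoc (parts : List (List Char)) (s : List Char) :
    pvRep parts ++ s = PySem.Chars.join [' '] (parts ++ [s]) := by
  induction parts with
  | nil => simp [pvRep, PySem.Chars.join_singleton]
  | cons p rest ih =>
    cases rest with
    | nil =>
      simp [pvRep, PySem.Chars.join_singleton, PySem.Chars.join_cons_cons]
    | cons q r =>
      simp only [pvRep, List.cons_append, PySem.Chars.join_cons_cons] at ih ⊢
      simp only [List.append_assoc] at ih ⊢
      rw [← ih]

theorem pvRep_snoc_space (parts : List (List Char)) (s : List Char) :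
    (pvRep parts ++ s) ++ [' '] = pvRep (parts ++ [s]) := by
  cases parts with
  | nil => simp [pvRep, PySem.Chars.join_singleton]
  | cons p r =>
    have h := pvRep_snoc (p :: r) s
    simp only [List.cons_append, pvRep] at h ⊢
    rw [h]

-- the underflow flag is sticky
theorem pvScan_bad_sticky (cs : List Char) : ∀ d : Int, (cs.foldl pvScanStep (d, true)).2 = true := by
  induction cs with
  | nil => intro d; rfl
  | cons c rest ih =>
    intro d
    simp only [List.foldl_cons, pvScanStep]
    split_ifs <;> exact ih _

-- A's validator computed by B's incremental scan (stack content is all '(' so only its length matters)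
theorem pvValidate_eq_scan (cs : List Char) : ∀ stack : List Char,
    pvValidate stack cs =
      (decide ((cs.foldl pvScanStep ((stack.length : Int), false)).1 = 0) &&
       !(cs.foldl pvScanStep ((stack.length : Int), false)).2) := by
  induction cs with
  | nil =>
    intro stack
    cases stack with
    | nil => simp [pvValidate]
    | cons h t =>
      simp [pvValidate]
      omega
  | cons c rest ih =>
    intro stack
    by_cases h1 : c = '('
    · subst h1
      simp only [pvValidate, List.foldl_cons, pvScanStep]
      have hlen : ((('(' :: stack).length : Int)) = (stack.length : Int) + 1 := by
        simp only [List.length_cons]; push_cast; ring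
      have h := ih ('(' :: stack)
      rw [hlen] at h
      exact h
    · by_cases h2 : c = ')'
      · subst h2
        simp only [pvValidate, List.foldl_cons, pvScanStep,
          if_neg (by decide : ¬ (')' = '('))]
        cases stack with
        | nil =>
          have hz : ((List.length ([] : List Char) : Int)) = 0 := by simp
          rw [if_pos hz]
          have hb := pvScan_bad_sticky rest 0
          simp [hb]
        | cons h t =>
          have hne : (((h :: t).length : Int)) ≠ 0 := by
            simp only [List.length_cons]; push_cast; omega
          rw [if_neg hne]
          have hlen : (((h :: t).length : Int)) - 1 = (t.length : Int) := by
            simp only [List.length_cons]; push_cast; ring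
          rw [hlen]
          exact ih t
      · simp only [pvValidate, List.foldl_cons, pvScanStep, if_neg h1, if_neg h2]
        exact ih stack

-- invariant-carrying equivalence of the two folds
theorem pv_fold_eq (steps : List String) :
    ∀ (acc : List String) (parts : List (List Char)) (d : Int) (bad : Bool),
    (pvRep parts).foldl pvScanStep (0, false) = (d, bad) →
    (steps.foldl (fun (st : List String × List Char) step =>
        let temp := st.2 ++ (PySem.Str.strip step).toList
        if pvValidate [] temp then (st.1 ++ [String.ofList temp], [])
        else (st.1, temp ++ [' '])) (acc, pvRep parts)).1 =
    (steps.foldl (fun (st : List String × List (List Char) × Int × Bool) step =>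
        let s := (PySem.Str.strip step).toList
        let parts := st.2.1 ++ [s]
        let db := s.foldl pvScanStep (st.2.2.1, st.2.2.2)
        if db.1 = 0 ∧ db.2 = false then
          (st.1 ++ [String.ofList (PySem.Chars.join [' '] parts)], [], 0, false)
        else (st.1, parts, db.1, db.2)) (acc, parts, d, bad)).1 := by
  induction steps with
  | nil => intro acc parts d bad _; rfl
  | cons step rest ih =>
    intro acc parts d bad hinv
    simp only [List.foldl_cons]
    set s := (PySem.Str.strip step).toList with hs
    have hscan : s.foldl pvScanStep (d, bad) =
        (pvRep parts ++ s).foldl pvScanStep (0, false) := by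
      rw [List.foldl_append, hinv]
    have hcond : pvValidate [] (pvRep parts ++ s) =
        (decide ((s.foldl pvScanStep (d, bad)).1 = 0) && !(s.foldl pvScanStep (d, bad)).2) := by
      rw [hscan]
      simpa using pvValidate_eq_scan (pvRep parts ++ s) []
    by_cases hb : (s.foldl pvScanStep (d, bad)).1 = 0 ∧ (s.foldl pvScanStep (d, bad)).2 = false
    · -- both flush
      have hA : pvValidate [] (pvRep parts ++ s) = true := by
        rw [hcond, hb.1, hb.2]; simp
      simp only [hA, if_pos, hb]
      rw [pvRep_snoc]
      have hnil : pvRep ([] : List (List Char)) = [] := rfl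
      have hnext := ih (acc ++ [String.ofList (PySem.Chars.join [' '] (parts ++ [s]))]) [] 0 false (by rfl)
      simpa [hnil] using hnext
    · -- neither flushes
      have hA : pvValidate [] (pvRep parts ++ s) = false := by
        rw [hcond]
        cases hB : (s.foldl pvScanStep (d, bad)).2 with
        | true => simp
        | false =>
          have h1 : (s.foldl pvScanStep (d, bad)).1 ≠ 0 := fun h => hb ⟨h, hB⟩
          simp [h1]
      simp only [hA, Bool.false_eq_true, hb]
      have hinv' : (pvRep (parts ++ [s])).foldl pvScanStep (0, false) =
          ((s.foldl pvScanStep (d, bad)).1, (s.foldl pvScanStep (d, bad)).2) := by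
        rw [← pvRep_snoc_space, List.foldl_append, List.foldl_append, hinv]
        simp [pvScanStep]
      have hnext := ih acc (parts ++ [s]) (s.foldl pvScanStep (d, bad)).1 (s.foldl pvScanStep (d, bad)).2 hinv'
      rw [pvRep_snoc_space]
      exact hnext

-- ===== VERDICT (by name: the statement is the Claim_ definition above) =====
theorem balance_parentheses_spec : Claim_equal_balance_parentheses := by
  intro steps _
  show balance_parentheses steps = balance_parentheses_alt steps
  unfold balance_parentheses balance_parentheses_alt
  exact pv_fold_eq steps [] [] 0 false (by rfl)
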